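-- pv_equiv track=rewrite | github.com/MultiPath/Squirrel | tools/reorder.py | recover_sents
-- ===== SOURCE A (Python) =====
-- def recover_sents(data):
--     outputs = []
--     o = []
--     for i, d in enumerate(data):
--         o.append(i)
--         if '@@' not in d:
--             outputs.append(o)
--             o = []
--
--     lines = [''.join([data[oi].replace('@@', '') for oi in o]) for o in outputs]
--     return lines, outputs
-- ===== SOURCE B (Python) =====
-- def recover_sents(data):
--     lines, outputs = [], []
--     o, ps = [], []
--     for i, d in enumerate(data):
--         o.append(i)
--         ps.append(d.replace('@@', ''))
--         if '@@' not in d: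
--             lines.append(''.join(ps))
--             outputs.append(o)
--             o, ps = [], []
--     return lines, outputs
-- ===== Notes on version B (the rewrite author's own statement) =====
-- stated objective: alternative
-- what changed: Single fused pass that accumulates each line's stripped pieces alongside the index group, instead of A's two phases (group indices first, then rebuild lines by re-indexing into data).
import Mathlib
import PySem

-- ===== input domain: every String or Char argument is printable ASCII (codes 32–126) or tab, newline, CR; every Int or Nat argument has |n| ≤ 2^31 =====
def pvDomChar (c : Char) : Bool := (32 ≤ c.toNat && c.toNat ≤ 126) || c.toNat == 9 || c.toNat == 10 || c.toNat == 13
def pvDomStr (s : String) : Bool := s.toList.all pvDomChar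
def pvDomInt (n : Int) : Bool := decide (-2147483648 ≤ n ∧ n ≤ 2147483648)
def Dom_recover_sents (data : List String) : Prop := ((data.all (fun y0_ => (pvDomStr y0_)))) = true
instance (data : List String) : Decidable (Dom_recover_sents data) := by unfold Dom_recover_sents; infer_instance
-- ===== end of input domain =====

-- B fuses A's two phases (index grouping, then re-indexed join) into one pass that
-- accumulates each line's stripped pieces alongside the index group (alternative decomposition).


-- ===== PORT A =====
-- data[oi] with oi always a valid nonnegative index is ported as pyGetD with default "".
def recover_sents (data : List String) : List String × List (List Int) :=
  let st := (PySem.List.enumerate data 0).foldl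
    (fun (st : List (List Int) × List Int) p =>
      let o := st.2 ++ [p.1]
      if PySem.Str.isIn "@@" p.2 then (st.1, o) else (st.1 ++ [o], []))
    ([], [])
  let outputs := st.1
  let lines := outputs.map (fun o =>
    PySem.Str.join "" (o.map (fun oi => PySem.Str.replace (PySem.List.pyGetD data oi "") "@@" "")))
  (lines, outputs)

-- ===== PORT B =====
def recover_sents_alt (data : List String) : List String × List (List Int) :=
  let st := (PySem.List.enumerate data 0).foldl
    (fun (st : (List String × List (List Int)) × (List Int × List String)) p =>
      let o := st.2.1 ++ [p.1]
      let ps := st.2.2 ++ [PySem.Str.replace p.2 "@@" ""]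
      if PySem.Str.isIn "@@" p.2 then (st.1, (o, ps))
      else ((st.1.1 ++ [PySem.Str.join "" ps], st.1.2 ++ [o]), ([], [])))
    (([], []), ([], []))
  st.1

-- ===== PRECONDITION & SPEC =====
def Spec_recover_sents (data : List String) (out : List String × List (List Int)) : Prop := out = recover_sents_alt data
instance (data : List String) (out : List String × List (List Int)) : Decidable (Spec_recover_sents data out) := by unfold Spec_recover_sents; infer_instance

-- ===== CLAIM (what is proved, stated in full; the proofs are below) =====
def Claim_equal_recover_sents : Prop := ∀ (data : List String), Dom_recover_sents data → Spec_recover_sents data (recover_sents data)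

-- ===== LEMMAS AND PROOFS =====

def pvPiece (d : String) : String := PySem.Str.replace d "@@" ""

def pvLineOf (data : List String) (o : List Int) : String :=
  PySem.Str.join "" (o.map (fun oi => pvPiece (PySem.List.pyGetD data oi "")))

def pvStepA : List (List Int) × List Int → Int × String → List (List Int) × List Int :=
  fun st p =>
    let o := st.2 ++ [p.1]
    if PySem.Str.isIn "@@" p.2 then (st.1, o) else (st.1 ++ [o], [])

def pvStepB : (List String × List (List Int)) × (List Int × List String) → Int × String →
    (List String × List (List Int)) × (List Int × List String) :=
  fun st p =>
    let o := st.2.1 ++ [p.1]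
    let ps := st.2.2 ++ [PySem.Str.replace p.2 "@@" ""]
    if PySem.Str.isIn "@@" p.2 then (st.1, (o, ps))
    else ((st.1.1 ++ [PySem.Str.join "" ps], st.1.2 ++ [o]), ([], []))

theorem pvInv (data : List String) (l : List (Int × String))
    (hl : ∀ p ∈ l, PySem.List.pyGetD data p.1 "" = p.2)
    (outs : List (List Int)) (o : List Int) :
    l.foldl pvStepB ((outs.map (pvLineOf data), outs),
        (o, o.map (fun oi => pvPiece (PySem.List.pyGetD data oi "")))) =
      (((l.foldl pvStepA (outs, o)).1.map (pvLineOf data), (l.foldl pvStepA (outs, o)).1),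
        ((l.foldl pvStepA (outs, o)).2,
          (l.foldl pvStepA (outs, o)).2.map (fun oi => pvPiece (PySem.List.pyGetD data oi "")))) := by
  induction l generalizing outs o with
  | nil => simp
  | cons p t ih =>
    obtain ⟨i, d⟩ := p
    have hd : PySem.List.pyGetD data i "" = d := hl (i, d) (List.mem_cons_self ..)
    have hrest : ∀ q ∈ t, PySem.List.pyGetD data q.1 "" = q.2 :=
      fun q hq => hl q (List.mem_cons_of_mem _ hq)
    simp only [List.foldl_cons]
    by_cases h : PySem.Chars.isIn ['@', '@'] d.toList = true
    · have e1 : pvStepB ((outs.map (pvLineOf data), outs),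
          (o, o.map (fun oi => pvPiece (PySem.List.pyGetD data oi "")))) (i, d) =
          ((outs.map (pvLineOf data), outs),
            (o ++ [i], (o ++ [i]).map (fun oi => pvPiece (PySem.List.pyGetD data oi "")))) := by
        simp [pvStepB, h, pvPiece, hd]
      have e2 : pvStepA (outs, o) (i, d) = (outs, o ++ [i]) := by simp [pvStepA, h]
      rw [e1, e2, ih hrest _ _]
    · have e1 : pvStepB ((outs.map (pvLineOf data), outs),
          (o, o.map (fun oi => pvPiece (PySem.List.pyGetD data oi "")))) (i, d) =
          (((outs ++ [o ++ [i]]).map (pvLineOf data), outs ++ [o ++ [i]]), ([], [])) := by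
        simp [pvStepB, h, pvPiece, pvLineOf, hd]
      have e2 : pvStepA (outs, o) (i, d) = (outs ++ [o ++ [i]], []) := by simp [pvStepA, h]
      rw [e1, e2]
      have := ih hrest (outs ++ [o ++ [i]]) []
      simpa using this

theorem pvEnum_get (data : List String) :
    ∀ p ∈ PySem.List.enumerate data 0, PySem.List.pyGetD data p.1 "" = p.2 := by
  intro p hp
  rw [PySem.List.mem_enumerate_iff] at hp
  obtain ⟨k, hk, rfl⟩ := hp
  simp [PySem.List.pyGetD_ofNat _ _ _ hk]

-- ===== VERDICT (by name: the statement is the Claim_ definition above) =====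
theorem recover_sents_spec : Claim_equal_recover_sents := by
  intro data _
  unfold Spec_recover_sents recover_sents recover_sents_alt
  have h := pvInv data (PySem.List.enumerate data 0) (pvEnum_get data) [] []
  simp only [List.map_nil] at h
  show _ = ((PySem.List.enumerate data 0).foldl pvStepB (([], []), ([], []))).1
  rw [h]
  rfl
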